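-- pv_equiv track=rewrite | github.com/PrajwalKusha/JobScout-AI | backend/resume_parser.py | collect_bullets
-- ===== SOURCE A (Python) =====
-- def collect_bullets(lines, start_idx):
--     bullets = []
--     current_bullet = None
--     i = start_idx
--     while i < len(lines):
--         line = lines[i]
--         stripped = line.strip()
--         if not stripped:
--             i += 1
--             continue
--         if stripped.startswith('•') or stripped.startswith('-'):
--             if current_bullet:
--                 bullets.append(current_bullet.strip())
--             current_bullet = stripped[1:].strip()
--         elif current_bullet is not None:
--             current_bullet += ' ' + stripped
--         else:
--             break  # End of bullets
--         i += 1
--     if current_bullet: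
--         bullets.append(current_bullet.strip())
--     return bullets, i
-- ===== SOURCE B (Python) =====
-- def collect_bullets(lines, start_idx):
--     n = len(lines)
--     # Phase 1: skip blank lines; stop at the first non-blank line (or the end).
--     i = start_idx
--     while i < n and not lines[i].strip():
--         i += 1
--     if i >= n or not lines[i].strip().startswith(('•', '-')):
--         return [], i
--     # Phase 2: group the remaining lines into bullets (a new group per marker line).
--     groups = []
--     for j in range(i, n):
--         s = lines[j].strip()
--         if not s:
--             continue
--         if s.startswith(('•', '-')):
--             groups.append([s[1:].strip()])
--         else:
--             groups[-1].append(s)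
--     # Phase 3: join each group and keep the non-empty texts.
--     bullets = []
--     for g in groups:
--         text = ' '.join(g).strip()
--         if text:
--             bullets.append(text)
--     return bullets, n
-- ===== Notes on version B (the rewrite author's own statement) =====
-- stated objective: alternative
-- what changed: Replaces A's single stateful while-loop (optional current-bullet accumulator mutated across iterations) by three separate phases: skip blanks / early return, group lines into bullet part-lists with a for-loop, then join and filter the groups.
import Mathlib
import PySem

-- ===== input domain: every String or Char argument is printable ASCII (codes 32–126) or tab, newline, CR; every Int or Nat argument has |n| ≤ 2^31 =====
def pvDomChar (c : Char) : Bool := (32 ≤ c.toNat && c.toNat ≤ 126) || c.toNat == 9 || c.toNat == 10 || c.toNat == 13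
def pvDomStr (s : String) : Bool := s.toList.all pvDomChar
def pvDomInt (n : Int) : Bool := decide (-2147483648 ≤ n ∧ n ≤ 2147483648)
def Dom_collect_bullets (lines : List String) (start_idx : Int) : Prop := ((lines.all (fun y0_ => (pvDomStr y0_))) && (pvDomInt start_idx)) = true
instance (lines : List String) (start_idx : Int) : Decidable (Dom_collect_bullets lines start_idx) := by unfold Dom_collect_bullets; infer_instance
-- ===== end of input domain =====

-- B re-implements A's single stateful while-loop as three phases (skip blanks / group lines per
-- bullet marker / join-and-filter the groups); same cost, proved to return the same value on Pre_.

-- ===== PORT A =====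
-- the while loop of A; fuel counts the remaining iterations ((len(lines) - i).toNat at top level),
-- state = (bullets, current_bullet, i); pyGet? = none (IndexError) exits with the current state
-- (outside Pre_).
def collectA_loop (lines : List String) : Nat → List String → Option String → Int → List String × Option String × Int
  | 0, bullets, current, i => (bullets, current, i)
  | fuel+1, bullets, current, i =>
    if i < (lines.length : Int) then
      match PySem.List.pyGet? lines i with
      | none => (bullets, current, i)
      | some line =>
        let stripped := PySem.Str.strip line
        if stripped = "" then collectA_loop lines fuel bullets current (i+1)
        else if PySem.Str.startswith stripped "•" || PySem.Str.startswith stripped "-" then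
          collectA_loop lines fuel
            (match current with
             | some c => if c ≠ "" then bullets ++ [PySem.Str.strip c] else bullets
             | none => bullets)
            (some (PySem.Str.strip (PySem.Str.slice stripped (some 1) none))) (i+1)
        else
          match current with
          | some c => collectA_loop lines fuel bullets (some (c ++ " " ++ stripped)) (i+1)
          | none => (bullets, current, i)
    else (bullets, current, i)

-- the trailing 'if current_bullet: bullets.append(current_bullet.strip())' and the return
def finishA (r : List String × Option String × Int) : List String × Int :=
  match r.2.1 with
  | some c => if c ≠ "" then (r.1 ++ [PySem.Str.strip c], r.2.2) else (r.1, r.2.2)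
  | none => (r.1, r.2.2)

def collect_bullets (lines : List String) (start_idx : Int) : List String × Int :=
  finishA (collectA_loop lines ((lines.length : Int) - start_idx).toNat [] none start_idx)

-- ===== PORT B =====
-- phase 1 of Source B: while i < n and not lines[i].strip(): i += 1   (same fuel convention as A's loop)
def skipBlank (lines : List String) : Nat → Int → Int
  | 0, i => i
  | fuel+1, i =>
    if i < (lines.length : Int) then
      match PySem.List.pyGet? lines i with
      | none => i
      | some line => if PySem.Str.strip line = "" then skipBlank lines fuel (i+1) else i
    else i

-- Source B's groups[-1].append(s)
def appendLast : List (List String) → String → List (List String)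
  | [], _ => []
  | [g], s => [g ++ [s]]
  | g :: rest, s => g :: appendLast rest s

-- the body of Source B's phase-2 for-loop
def bStep (lines : List String) (gs : List (List String)) (j : Int) : List (List String) :=
  match PySem.List.pyGet? lines j with
  | none => gs
  | some line =>
    let s := PySem.Str.strip line
    if s = "" then gs
    else if PySem.Str.startswith s "•" || PySem.Str.startswith s "-" then
      gs ++ [[PySem.Str.strip (PySem.Str.slice s (some 1) none)]]
    else appendLast gs s

-- phases 2 and 3 of Source B, entered with i = the index phase 1 stopped at
def altCore (lines : List String) (i : Int) : List String × Int :=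
  if i < (lines.length : Int) then
    match PySem.List.pyGet? lines i with
    | none => ([], i)
    | some line =>
      if PySem.Str.startswith (PySem.Str.strip line) "•" || PySem.Str.startswith (PySem.Str.strip line) "-" then
        let groups := (PySem.List.pyRange i (lines.length : Int)).foldl (bStep lines) []
        (groups.foldl (fun acc g =>
            let text := PySem.Str.strip (PySem.Str.join " " g)
            if text ≠ "" then acc ++ [text] else acc) [], (lines.length : Int))
      else ([], i)
  else ([], i)

def collect_bullets_alt (lines : List String) (start_idx : Int) : List String × Int :=
  altCore lines (skipBlank lines ((lines.length : Int) - start_idx).toNat start_idx)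

-- ===== PRECONDITION & SPEC =====
-- Pre_ excludes exactly start_idx < -len(lines), where A (and B) raise IndexError on lines[i].
def Pre_collect_bullets (lines : List String) (start_idx : Int) : Prop :=
  -(lines.length : Int) ≤ start_idx
instance (lines : List String) (start_idx : Int) : Decidable (Pre_collect_bullets lines start_idx) := by unfold Pre_collect_bullets; infer_instance

def pvWitness_collect_bullets : List String × Int := (["- a", "  b", "", "- c"], 0)

def Spec_collect_bullets (lines : List String) (start_idx : Int) (out : List String × Int) : Prop := out = collect_bullets_alt lines start_idx
instance (lines : List String) (start_idx : Int) (out : List String × Int) : Decidable (Spec_collect_bullets lines start_idx out) := by unfold Spec_collect_bullets; infer_instance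

-- ===== CLAIM (what is proved, stated in full; the proofs are below) =====
def Claim_equal_collect_bullets : Prop := ∀ (lines : List String) (start_idx : Int), Dom_collect_bullets lines start_idx → Pre_collect_bullets lines start_idx → Spec_collect_bullets lines start_idx (collect_bullets lines start_idx)

-- ===== LEMMAS AND PROOFS =====

-- a non-space character of cs survives strip
-- a membership survives dropWhile when the predicate fails on it
theorem mem_dropWhile_of_not (p : Char → Bool) (l : List Char) (ch : Char) (h : ch ∈ l)
    (hs : p ch = false) : ch ∈ List.dropWhile p l := by
  have h2 : ch ∈ List.takeWhile p l ++ List.dropWhile p l := by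
    rw [List.takeWhile_append_dropWhile]; exact h
  rcases List.mem_append.mp h2 with h' | h'
  · exact absurd (List.mem_takeWhile_imp h') (by simp [hs])
  · exact h'

-- a non-space character of cs survives strip
theorem mem_strip_of_not_isspace (cs : List Char) (ch : Char) (h : ch ∈ cs)
    (hs : PySem.Chars.isspace ch = false) : ch ∈ PySem.Chars.strip cs := by
  have hl : ch ∈ PySem.Chars.lstrip cs := mem_dropWhile_of_not _ _ _ h hs
  unfold PySem.Chars.strip PySem.Chars.rstrip
  rw [List.mem_reverse]
  exact mem_dropWhile_of_not _ _ _ (List.mem_reverse.mpr hl) hs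

-- a nonempty strip result contains a non-space character
theorem strip_ne_nil_exists (cs : List Char) (h : PySem.Chars.strip cs ≠ []) :
    ∃ ch ∈ PySem.Chars.strip cs, PySem.Chars.isspace ch = false := by
  unfold PySem.Chars.strip PySem.Chars.rstrip at *
  set l := List.dropWhile PySem.Chars.isspace (PySem.Chars.lstrip cs).reverse with hl
  have hne : l ≠ [] := by intro h0; apply h; rw [h0]; rfl
  refine ⟨l.head hne, ?_, ?_⟩
  · simp only [List.mem_reverse]
    exact List.head_mem hne
  · exact List.head_dropWhile_not _ hne

-- invariant carried for A's current_bullet string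
def InvS (c : String) : Prop := c = "" ∨ ∃ ch ∈ c.toList, PySem.Chars.isspace ch = false

theorem inv_strip (x : String) : InvS (PySem.Str.strip x) := by
  by_cases h : PySem.Str.strip x = ""
  · exact Or.inl h
  · right
    have h' : PySem.Chars.strip x.toList ≠ [] := by
      intro h0
      apply h
      rw [← String.toList_inj, PySem.Str.toList_strip, h0]; rfl
    obtain ⟨ch, hm, hs⟩ := strip_ne_nil_exists x.toList h'
    exact ⟨ch, by rw [PySem.Str.toList_strip]; exact hm, hs⟩

theorem cond_iff (c : String) (h : InvS c) : (c ≠ "") ↔ (PySem.Str.strip c ≠ "") := by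
  constructor
  · intro hne
    rcases h with h | ⟨ch, hm, hs⟩
    · exact absurd h hne
    · intro h0
      have : ch ∈ PySem.Chars.strip c.toList := mem_strip_of_not_isspace _ _ hm hs
      rw [← PySem.Str.toList_strip, h0] at this
      simp at this
  · intro hne h0
    apply hne; rw [h0]; rfl

-- ' '.join of a singleton / of an appended element
theorem join_singleton' (x : String) : PySem.Str.join " " [x] = x := by
  rw [← String.toList_inj]
  simp [PySem.Str.join, PySem.Chars.join, List.intercalate]

theorem charsJoinApp (sep : List Char) (x : List Char) :
    ∀ (l : List (List Char)), l ≠ [] →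
    PySem.Chars.join sep (l ++ [x]) = PySem.Chars.join sep l ++ sep ++ x := by
  intro l
  induction l with
  | nil => intro h; exact absurd rfl h
  | cons a t ih =>
    intro _
    cases t with
    | nil => simp [PySem.Chars.join, List.intercalate]
    | cons b t' =>
      have hrec := ih (by simp)
      have key : ∀ (aa bb : List Char) (tt : List (List Char)),
          PySem.Chars.join sep (aa :: bb :: tt) = aa ++ sep ++ PySem.Chars.join sep (bb :: tt) := by
        intro aa bb tt
        show (List.intersperse sep (aa :: bb :: tt)).flatten = aa ++ sep ++ (List.intersperse sep (bb :: tt)).flatten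
        rw [show List.intersperse sep (aa :: bb :: tt) = aa :: sep :: List.intersperse sep (bb :: tt) from rfl]
        simp [List.append_assoc]
      simp only [List.cons_append] at hrec ⊢
      rw [key a b (t' ++ [x]), key a b t', hrec]
      simp [List.append_assoc]

theorem join_append_singleton (g : List String) (s : String) (hg : g ≠ []) :
    PySem.Str.join " " (g ++ [s]) = PySem.Str.join " " g ++ " " ++ s := by
  rw [← String.toList_inj]
  simp only [PySem.Str.join, String.toList_append, String.toList_ofList, List.map_append,
    List.map_cons, List.map_nil]
  exact charsJoinApp " ".toList s.toList (g.map String.toList) (by simp [hg])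

-- what B's phase 3 emits from a list of groups
def emitL (gs : List (List String)) : List String :=
  gs.flatMap (fun g =>
    if PySem.Str.strip (PySem.Str.join " " g) ≠ "" then [PySem.Str.strip (PySem.Str.join " " g)] else [])

theorem emit_foldl (gs : List (List String)) (acc : List String) :
    gs.foldl (fun acc g =>
        let text := PySem.Str.strip (PySem.Str.join " " g)
        if text ≠ "" then acc ++ [text] else acc) acc = acc ++ emitL gs := by
  induction gs generalizing acc with
  | nil => simp [emitL]
  | cons g t ih =>
    simp only [List.foldl_cons]
    rw [ih]
    simp only [emitL, List.flatMap_cons]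
    split_ifs <;> simp

theorem appendLast_ne_nil (gs : List (List String)) (s : String) (h : gs ≠ []) :
    appendLast gs s ≠ [] := by
  cases gs with
  | nil => exact absurd rfl h
  | cons g t => cases t <;> simp [appendLast]

theorem appendLast_append (gs0 gs1 : List (List String)) (s : String) (h : gs1 ≠ []) :
    appendLast (gs0 ++ gs1) s = gs0 ++ appendLast gs1 s := by
  induction gs0 with
  | nil => rfl
  | cons a t ih =>
    have ht : t ++ gs1 ≠ [] := by
      cases t <;> simp [h]
    cases h' : t ++ gs1 with
    | nil => exact absurd h' ht
    | cons b u =>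
      simp only [List.cons_append, appendLast, h']
      rw [← h', ih]

theorem bStep_ne_nil (lines : List String) (gs : List (List String)) (j : Int) (h : gs ≠ []) :
    bStep lines gs j ≠ [] := by
  unfold bStep
  cases PySem.List.pyGet? lines j with
  | none => exact h
  | some line =>
    simp only
    split_ifs with h1 h2
    · exact h
    · simp
    · exact appendLast_ne_nil _ _ h

theorem bStep_append (lines : List String) (gs0 gs1 : List (List String)) (j : Int) (h : gs1 ≠ []) :
    bStep lines (gs0 ++ gs1) j = gs0 ++ bStep lines gs1 j := by
  unfold bStep
  cases PySem.List.pyGet? lines j with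
  | none => rfl
  | some line =>
    simp only
    split_ifs with h1 h2
    · rfl
    · simp
    · exact appendLast_append _ _ _ h

theorem foldl_bStep_append (lines : List String) (js : List Int) (gs0 gs1 : List (List String))
    (h : gs1 ≠ []) :
    js.foldl (bStep lines) (gs0 ++ gs1) = gs0 ++ js.foldl (bStep lines) gs1 := by
  induction js generalizing gs1 with
  | nil => rfl
  | cons j t ih =>
    simp only [List.foldl_cons]
    rw [bStep_append lines gs0 gs1 j h, ih _ (bStep_ne_nil lines gs1 j h)]

theorem pyGet?_exists {α : Type} (xs : List α) (i : Int) (h0 : -(xs.length : Int) ≤ i)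
    (h1 : i < (xs.length : Int)) : ∃ x, PySem.List.pyGet? xs i = some x := by
  cases h : PySem.List.pyGet? xs i with
  | some x => exact ⟨x, rfl⟩
  | none =>
    exfalso
    have := (PySem.List.pyGet?_eq_none_iff xs i).mp h
    exact this ⟨h0, h1⟩

theorem emit_single (c : String) (g : List String) (hc : c = PySem.Str.join " " g)
    (hinv : InvS c) (bullets : List String) :
    (if c ≠ "" then bullets ++ [PySem.Str.strip c] else bullets) = bullets ++ emitL [g] := by
  simp only [emitL, List.flatMap_cons, List.flatMap_nil, List.append_nil, ← hc]
  by_cases hne : c ≠ ""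
  · rw [if_pos hne, if_pos ((cond_iff c hinv).mp hne)]
  · have hc0 : c = "" := not_not.mp hne
    rw [if_neg hne, if_neg (by rw [hc0]; decide)]
    simp

theorem finishA_exit (c : String) (g : List String) (hc : c = PySem.Str.join " " g)
    (hinv : InvS c) (bullets : List String) (n : Int) :
    finishA (bullets, some c, n) = (bullets ++ emitL [g], n) := by
  simp only [finishA]
  have h2 : (if c ≠ "" then (bullets ++ [PySem.Str.strip c], n) else (bullets, n))
      = ((if c ≠ "" then bullets ++ [PySem.Str.strip c] else bullets), n) := by
    split_ifs <;> rfl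
  rw [h2, emit_single c g hc hinv bullets]

-- A's loop, once a bullet has been started, matches B's phase-2 fold + phase-3 emit
theorem loopC (lines : List String) : ∀ (fuel : Nat) (i : Int) (c : String) (g : List String) (bullets : List String),
    -(lines.length : Int) ≤ i → i ≤ (lines.length : Int) → (lines.length : Int) - i ≤ (fuel : Int) →
    g ≠ [] → c = PySem.Str.join " " g → InvS c →
    finishA (collectA_loop lines fuel bullets (some c) i)
      = (bullets ++ emitL ((PySem.List.pyRange i (lines.length : Int)).foldl (bStep lines) [g]), (lines.length : Int)) := by
  intro fuel
  induction fuel with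
  | zero =>
    intro i c g bullets hlo hhi hfuel hg hc hinv
    have hi : i = (lines.length : Int) := by
      simp only [Nat.cast_zero] at hfuel; omega
    subst hi
    rw [PySem.List.pyRange_one_eq_nil le_rfl]
    simp only [collectA_loop, List.foldl_nil]
    exact finishA_exit c g hc hinv bullets _
  | succ fuel ih =>
    intro i c g bullets hlo hhi hfuel hg hc hinv
    by_cases hi : i < (lines.length : Int)
    · obtain ⟨line, hline⟩ := pyGet?_exists lines i hlo hi
      rw [PySem.List.pyRange_one_cons hi]
      simp only [collectA_loop, if_pos hi, hline, List.foldl_cons]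
      by_cases hblank : PySem.Str.strip line = ""
      · rw [if_pos hblank]
        have hstep : bStep lines [g] i = [g] := by
          unfold bStep; rw [hline]; simp only [if_pos hblank]
        rw [hstep]
        exact ih (i+1) c g bullets (by omega) (by omega) (by omega) hg hc hinv
      · rw [if_neg hblank]
        by_cases hbul : (PySem.Str.startswith (PySem.Str.strip line) "•" || PySem.Str.startswith (PySem.Str.strip line) "-") = true
        · rw [if_pos hbul]
          have hstep : bStep lines [g] i = [g, [PySem.Str.strip (PySem.Str.slice (PySem.Str.strip line) (some 1) none)]] := by
            unfold bStep; rw [hline]; simp only [if_neg hblank, if_pos hbul]; rfl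
          rw [hstep]
          set c0 := PySem.Str.strip (PySem.Str.slice (PySem.Str.strip line) (some 1) none) with hc0
          have hrec := ih (i+1) c0 [c0]
            (if c ≠ "" then bullets ++ [PySem.Str.strip c] else bullets)
            (by omega) (by omega) (by omega)
            (by simp) (join_singleton' c0).symm (inv_strip _)
          have hlist : ([g, [c0]] : List (List String)) = [g] ++ [[c0]] := rfl
          rw [hlist, foldl_bStep_append lines _ [g] [[c0]] (by simp)]
          have hemit : emitL ([g] ++ (PySem.List.pyRange (i+1) (lines.length : Int)).foldl (bStep lines) [[c0]])
              = emitL [g] ++ emitL ((PySem.List.pyRange (i+1) (lines.length : Int)).foldl (bStep lines) [[c0]]) := by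
            simp [emitL]
          rw [hemit]
          have hbul' := emit_single c g hc hinv bullets
          rw [hrec, hbul', List.append_assoc]
        · rw [if_neg hbul]
          have hstep : bStep lines [g] i = [g ++ [PySem.Str.strip line]] := by
            unfold bStep; rw [hline]; simp only [if_neg hblank, if_neg hbul]; rfl
          rw [hstep]
          have hinv' : InvS (c ++ " " ++ PySem.Str.strip line) := by
            right
            have h' : PySem.Chars.strip line.toList ≠ [] := by
              intro h0; apply hblank
              rw [← String.toList_inj, PySem.Str.toList_strip, h0]; rfl
            obtain ⟨ch, hm, hs⟩ := strip_ne_nil_exists line.toList h'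
            refine ⟨ch, ?_, hs⟩
            simp only [String.toList_append, List.mem_append]
            right
            rw [PySem.Str.toList_strip]; exact hm
          exact ih (i+1) (c ++ " " ++ PySem.Str.strip line) (g ++ [PySem.Str.strip line]) bullets
            (by omega) (by omega) (by omega)
            (by simp) (by rw [hc, join_append_singleton g _ hg]) hinv'
    · have hi' : i = (lines.length : Int) := by omega
      subst hi'
      rw [PySem.List.pyRange_one_eq_nil le_rfl]
      simp only [collectA_loop, if_neg hi, List.foldl_nil]
      exact finishA_exit c g hc hinv bullets _

-- A from the initial (no-bullet) state matches B's phase 1 + core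
theorem loopT (lines : List String) : ∀ (fuel : Nat) (i : Int),
    -(lines.length : Int) ≤ i → (lines.length : Int) - i ≤ (fuel : Int) →
    finishA (collectA_loop lines fuel [] none i) = altCore lines (skipBlank lines fuel i) := by
  intro fuel
  induction fuel with
  | zero =>
    intro i hlo hfuel
    have hi : ¬ i < (lines.length : Int) := by
      simp only [Nat.cast_zero] at hfuel; omega
    simp only [collectA_loop, skipBlank, finishA, altCore, if_neg hi]
  | succ fuel ih =>
    intro i hlo hfuel
    by_cases hi : i < (lines.length : Int)
    · obtain ⟨line, hline⟩ := pyGet?_exists lines i hlo hi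
      simp only [collectA_loop, skipBlank, if_pos hi, hline]
      by_cases hblank : PySem.Str.strip line = ""
      · rw [if_pos hblank, if_pos hblank]
        exact ih (i+1) (by omega) (by omega)
      · rw [if_neg hblank, if_neg hblank]
        by_cases hbul : (PySem.Str.startswith (PySem.Str.strip line) "•" || PySem.Str.startswith (PySem.Str.strip line) "-") = true
        · rw [if_pos hbul]
          set c0 := PySem.Str.strip (PySem.Str.slice (PySem.Str.strip line) (some 1) none) with hc0
          have hrec := loopC lines fuel (i+1) c0 [c0] []
            (by omega) (by omega) (by omega)
            (by simp) (join_singleton' c0).symm (inv_strip _)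
          rw [hrec]
          simp only [altCore, if_pos hi, hline, if_pos hbul]
          rw [PySem.List.pyRange_one_cons hi]
          simp only [List.foldl_cons]
          have hstep : bStep lines [] i = [[c0]] := by
            unfold bStep; rw [hline]; simp only [if_neg hblank, if_pos hbul]; rfl
          rw [hstep, emit_foldl]
        · rw [if_neg hbul]
          simp only [finishA, altCore, if_pos hi, hline, if_neg hbul]
    · simp [collectA_loop, skipBlank, if_neg hi, finishA, altCore]

-- ===== VERDICT (by name: the statement is the Claim_ definition above) =====
theorem collect_bullets_spec : Claim_equal_collect_bullets := by
  intro lines start_idx _hdom hpre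
  unfold Spec_collect_bullets collect_bullets collect_bullets_alt
  exact loopT lines ((lines.length : Int) - start_idx).toNat start_idx hpre (by omega)
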